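-- pv_equiv track=rewrite | github.com/r5by/montgomery | mont/common.py | compress_sequential
-- ===== SOURCE A (Python) =====
-- REG_SIZE = 256  # the register size in bits
--
-- def compress_sequential(numbers, _bits=None):
--     if len(numbers) < 2:
--         raise ValueError(f'Must compress more than 2 numbers')
--
--     if len(numbers) == 2:
--         return numbers[0], numbers[1]
--
--     s, c = numbers[0], numbers[1]
--     for e in numbers[2:]:
--         s, c = csa(s, c, e, _bits)
--
--     return s, c
--
-- def csa(x, y, z, _T=REG_SIZE):
--     '''
--         3-2 CSA(Carry-save-adders) for three T-bit integers x, y and z;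
--         Generally speaking, csa of three T-bit integers shall produce two (T+1)-bit integers S(sum) and C(carry)
--     :param x:
--     :param y:
--     :param z:
--     :param _T: Max bit length of x,y,z if given, o.w. calc. from x,y,z
--     :return:
-- '''
--
--     # Initialize sum (S) and carry (C)
--     S = 0
--     C = 0
--
--     T = int(_T) if _T else max(x.bit_length(), y.bit_length(), z.bit_length())
--     # Iterate through each bit position
--     for i in range(T):
--         # Extract the ith bit from x, y, z
--         xb = (x >> i) & 1
--         yb = (y >> i) & 1
--         zb = (z >> i) & 1
--
--         # Sum bit (X XOR Y XOR Z)
--         Sb = xb ^ yb ^ zb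
--
--         # Carry bit ((X AND Y) OR (Y AND Z) OR (Z AND X))
--         Cb = (xb & yb) | (yb & zb) | (zb & xb)
--
--         # Set the ith bit in S and C
--         S |= (Sb << i)
--         C |= (Cb << i)
--
--     # C needs to be shifted left by one (to account for carry bit positions)
--     C <<= 1
--
--     return S, C
-- ===== SOURCE B (Python) =====
-- REG_SIZE = 256  # the register size in bits
--
-- def compress_sequential(numbers, _bits=None):
--     # Whole-word carry-save reduction: one XOR/AND-OR pass per operand instead of
--     # a per-bit loop; the T-bit window is applied with a single mask.
--     if len(numbers) < 2:
--         raise ValueError(f'Must compress more than 2 numbers')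
--
--     s, c = numbers[0], numbers[1]
--     for e in numbers[2:]:
--         T = int(_bits) if _bits else max(s.bit_length(), c.bit_length(), e.bit_length())
--         mask = (1 << max(T, 0)) - 1
--         s, c = (s ^ c ^ e) & mask, (((s & c) | (c & e) | (e & s)) & mask) << 1
--
--     return s, c
-- ===== Notes on version B (the rewrite author's own statement) =====
-- stated objective: faster
-- what changed: Replaces csa's per-bit loop (extract, xor/majority, reassemble bit by bit over T positions) with three whole-word big-int operations (s^c^e and the majority word) masked once to T bits.
import Mathlib
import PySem

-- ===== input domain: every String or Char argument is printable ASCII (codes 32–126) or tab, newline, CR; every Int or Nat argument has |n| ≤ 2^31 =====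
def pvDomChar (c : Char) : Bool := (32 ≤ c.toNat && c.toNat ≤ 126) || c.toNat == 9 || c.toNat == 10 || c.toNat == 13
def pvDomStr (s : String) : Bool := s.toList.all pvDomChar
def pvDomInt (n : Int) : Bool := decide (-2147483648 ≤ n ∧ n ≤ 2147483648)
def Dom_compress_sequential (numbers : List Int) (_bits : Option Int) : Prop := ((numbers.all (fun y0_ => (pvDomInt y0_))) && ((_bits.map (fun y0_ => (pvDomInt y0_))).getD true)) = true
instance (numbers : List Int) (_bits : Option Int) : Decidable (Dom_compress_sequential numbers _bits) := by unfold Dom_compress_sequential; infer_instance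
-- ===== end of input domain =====

-- B replaces A's per-bit CSA loop with whole-word XOR/AND-OR plus one T-bit mask (measured faster).
-- A mutates nothing; Python A returns a 2-tuple, rendered here as a 2-element list.


-- ===== PORT A =====
-- 'T = int(_T) if _T else max(x.bit_length(), y.bit_length(), z.bit_length())' (_T falsy iff None or 0)
def csaT (x y z : Int) (_T : Option Int) : Int :=
  match _T with
  | none => ((max (max (PySem.Int.bitLength x) (PySem.Int.bitLength y)) (PySem.Int.bitLength z) : Nat) : Int)
  | some t => if t = 0 then ((max (max (PySem.Int.bitLength x) (PySem.Int.bitLength y)) (PySem.Int.bitLength z) : Nat) : Int) else t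

-- A's helper csa: per-bit loop over range(T).  i ≥ 0 for every i in range(T), so 'i.toNat' is
-- exactly Python's shift amount.
def csa (x y z : Int) (_T : Option Int) : Int × Int :=
  let T := csaT x y z _T
  let SC := (PySem.List.pyRange 0 T 1).foldl
    (fun (SC : Int × Int) i =>
      let xb := PySem.Int.band (x >>> i.toNat) 1
      let yb := PySem.Int.band (y >>> i.toNat) 1
      let zb := PySem.Int.band (z >>> i.toNat) 1
      let Sb := PySem.Int.bxor (PySem.Int.bxor xb yb) zb
      let Cb := PySem.Int.bor (PySem.Int.bor (PySem.Int.band xb yb) (PySem.Int.band yb zb)) (PySem.Int.band zb xb)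
      (PySem.Int.bor SC.1 (Sb <<< i.toNat), PySem.Int.bor SC.2 (Cb <<< i.toNat)))
    (0, 0)
  (SC.1, SC.2 <<< 1)

def compress_sequential (numbers : List Int) (_bits : Option Int) : List Int :=
  if numbers.length < 2 then []          -- Python raises ValueError here; outside Pre_
  else if numbers.length = 2 then
    [PySem.List.pyGetD numbers 0 0, PySem.List.pyGetD numbers 1 0]
  else
    let sc := (PySem.List.slice numbers (some 2) none).foldl
      (fun (sc : Int × Int) e => csa sc.1 sc.2 e _bits)
      (PySem.List.pyGetD numbers 0 0, PySem.List.pyGetD numbers 1 0)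
    [sc.1, sc.2]

-- ===== PORT B =====
-- whole-word csa: S = (s^c^e)&mask, C = ((s&c)|(c&e)|(e&s))&mask << 1, mask = 2^max(T,0)-1
def csa_alt (s c e : Int) (_bits : Option Int) : Int × Int :=
  let T : Int :=
    match _bits with
    | none => ((max (max (PySem.Int.bitLength s) (PySem.Int.bitLength c)) (PySem.Int.bitLength e) : Nat) : Int)
    | some t => if t = 0 then ((max (max (PySem.Int.bitLength s) (PySem.Int.bitLength c)) (PySem.Int.bitLength e) : Nat) : Int) else t
  let mask : Int := ((1 : Int) <<< (max T 0).toNat) - 1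
  (PySem.Int.band (PySem.Int.bxor (PySem.Int.bxor s c) e) mask,
   (PySem.Int.band (PySem.Int.bor (PySem.Int.bor (PySem.Int.band s c) (PySem.Int.band c e)) (PySem.Int.band e s)) mask) <<< 1)

def compress_sequential_alt (numbers : List Int) (_bits : Option Int) : List Int :=
  match numbers with
  | s :: c :: rest =>
    let sc := rest.foldl (fun (sc : Int × Int) e => csa_alt sc.1 sc.2 e _bits) (s, c)
    [sc.1, sc.2]
  | _ => []                              -- Source B raises ValueError here; outside Pre_

-- ===== PRECONDITION & SPEC =====
-- Pre_ excludes exactly the inputs with fewer than two numbers, on which Python A raises ValueError.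
def Pre_compress_sequential (numbers : List Int) (_bits : Option Int) : Prop :=
  2 ≤ numbers.length
instance (numbers : List Int) (_bits : Option Int) : Decidable (Pre_compress_sequential numbers _bits) := by
  unfold Pre_compress_sequential; infer_instance
def pvWitness_compress_sequential : List Int × Option Int := ([3, -5, 9], some 8)

def Spec_compress_sequential (numbers : List Int) (_bits : Option Int) (out : List Int) : Prop := out = compress_sequential_alt numbers _bits
instance (numbers : List Int) (_bits : Option Int) (out : List Int) : Decidable (Spec_compress_sequential numbers _bits out) := by unfold Spec_compress_sequential; infer_instance

-- ===== CLAIM (what is proved, stated in full; the proofs are below) =====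
def Claim_equal_compress_sequential : Prop := ∀ (numbers : List Int) (_bits : Option Int), Dom_compress_sequential numbers _bits → Pre_compress_sequential numbers _bits → Spec_compress_sequential numbers _bits (compress_sequential numbers _bits)

-- ===== LEMMAS AND PROOFS =====

-- the i-th binary digit (two's complement) of an integer, as an integer 0 or 1
def dg (a : Int) (i : Nat) : Int := a / 2 ^ i % 2

theorem dg_nonneg (a : Int) (i : Nat) : 0 ≤ dg a i ∧ dg a i < 2 := by
  unfold dg
  constructor
  · exact Int.emod_nonneg _ (by norm_num)
  · exact Int.emod_lt_of_pos _ (by norm_num)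

-- Nat digit as a testBit
theorem natDigit (m i : Nat) : m / 2 ^ i % 2 = if m.testBit i then 1 else 0 := by
  have h : m.testBit i = (1 &&& m >>> i != 0) := rfl
  rw [Nat.shiftRight_eq_div_pow, Nat.land_comm, Nat.and_one_is_mod] at h
  rcases Nat.mod_two_eq_zero_or_one (m / 2 ^ i) with h2 | h2 <;> simp [h, h2]

-- floor division/mod of -(m+1) by a positive N
theorem negdiv (m : Nat) (N : Int) (hN : 0 < N) :
    (-(m : Int) - 1) / N = -((m : Int) / N) - 1 ∧ (-(m : Int) - 1) % N = N - 1 - (m : Int) % N := by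
  have hq := Int.ediv_add_emod (m : Int) N
  have hr0 : 0 ≤ (m : Int) % N := Int.emod_nonneg _ (by omega)
  have hr1 : (m : Int) % N < N := Int.emod_lt_of_pos _ hN
  set q := (m : Int) / N with hqdef
  set r := (m : Int) % N with hrdef
  have key : -(m : Int) - 1 = (N - 1 - r) + N * (-q - 1) := by linarith
  constructor
  · rw [key, Int.add_mul_ediv_left _ _ (by omega : N ≠ 0),
      Int.ediv_eq_zero_of_lt (by omega) (by omega)]
    ring
  · rw [key, Int.add_mul_emod_self_left, Int.emod_eq_of_lt (by omega) (by omega)]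

theorem dgNat (m : Nat) (i : Nat) : dg (m : Int) i = ((m / 2 ^ i % 2 : Nat) : Int) := by
  unfold dg
  push_cast
  rfl

theorem dgNeg (m : Nat) (i : Nat) : dg (-(m : Int) - 1) i = 1 - ((m / 2 ^ i % 2 : Nat) : Int) := by
  unfold dg
  have h2 : (0:Int) < 2 ^ i := by positivity
  rw [(negdiv m (2 ^ i) h2).1]
  have : -((m : Int) / 2 ^ i) - 1 = -((m / 2 ^ i : Nat) : Int) - 1 := by push_cast; rfl
  rw [this, (negdiv (m / 2 ^ i) 2 (by norm_num)).2]
  push_cast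
  ring

-- canonical sign forms
theorem int_neg_form (a : Int) (h : ¬ 0 ≤ a) : a = -(((-a - 1).toNat : Nat) : Int) - 1 := by omega
theorem int_nonneg_form (a : Int) (h : 0 ≤ a) : a = ((a.toNat : Nat) : Int) := by omega

-- disjoint Nat xor is addition
theorem dis_xor (a : Nat) : ∀ b : Nat, a &&& b = 0 → a ^^^ b = a + b := by
  induction a using Nat.binaryRec with
  | zero => intro b _; simp
  | bit ba a' ih =>
    intro b hb
    rw [← Nat.bit_testBit_zero_shiftRight_one b] at hb ⊢
    rw [Nat.land_bit] at hb
    rw [Nat.bit_val] at hb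
    have h1 : (ba && b.testBit 0) = false ∧ a' &&& (b >>> 1) = 0 := by
      rcases h : (ba && b.testBit 0) <;> rw [h] at hb <;> simp at hb <;> simp_all
    rw [Nat.xor_bit, ih (b >>> 1) h1.2, Nat.bit_val, Nat.bit_val, Nat.bit_val]
    rcases hab : ba <;> rcases hbb : b.testBit 0 <;> rw [hab, hbb] at h1 <;> simp_all <;> ring

-- disjoint Nat or is addition
theorem dis_or (a b : Nat) (h : a &&& b = 0) : a ||| b = a + b := by
  rw [← dis_xor a b h]
  apply Nat.eq_of_testBit_eq
  intro i
  have hi := congrArg (fun x => x.testBit i) h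
  simp only [Nat.testBit_land, Nat.zero_testBit] at hi
  simp only [Nat.testBit_lor, Nat.testBit_xor]
  rcases hA : a.testBit i <;> rcases hB : b.testBit i <;> simp [hA, hB] at hi ⊢

-- subtracting the common part is bitwise difference
theorem sub_and_testBit (m k i : Nat) :
    (m - (m &&& k)).testBit i = (m.testBit i && ! k.testBit i) := by
  have hdisj : (m ^^^ (m &&& k)) &&& (m &&& k) = 0 := by
    apply Nat.eq_of_testBit_eq
    intro j
    simp only [Nat.testBit_land, Nat.testBit_xor, Nat.zero_testBit]
    rcases m.testBit j <;> rcases k.testBit j <;> rfl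
  have hsum : (m ^^^ (m &&& k)) + (m &&& k) = m := by
    rw [← dis_xor _ _ hdisj, Nat.xor_xor_cancel_right]
  have hsub : m - (m &&& k) = m ^^^ (m &&& k) := by omega
  rw [hsub]
  simp only [Nat.testBit_xor, Nat.testBit_land]
  rcases m.testBit i <;> rcases k.testBit i <;> rfl

-- digit form of a nonnegative / negative integer via Nat.testBit
theorem dg_of_nonneg (a : Int) (h : 0 ≤ a) (i : Nat) :
    dg a i = if a.toNat.testBit i then 1 else 0 := by
  conv_lhs => rw [int_nonneg_form a h]
  rw [dgNat, natDigit]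
  split <;> simp

theorem dg_of_neg (a : Int) (h : ¬ 0 ≤ a) (i : Nat) :
    dg a i = 1 - (if (-a - 1).toNat.testBit i then 1 else 0) := by
  conv_lhs => rw [int_neg_form a h]
  rw [dgNeg, natDigit]
  split <;> simp

-- digits of the PySem bitwise words
theorem dg_bxor (a b : Int) (i : Nat) :
    dg (PySem.Int.bxor a b) i = (dg a i + dg b i) % 2 := by
  unfold PySem.Int.bxor
  rcases le_or_gt 0 a with ha | ha <;> rcases le_or_gt 0 b with hb | hb
  · rw [if_pos ha, if_pos hb, dg_of_nonneg a ha i, dg_of_nonneg b hb i, dgNat, natDigit,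
      Nat.testBit_xor]
    rcases h1 : a.toNat.testBit i <;> rcases h2 : b.toNat.testBit i <;> simp [h1, h2] <;> decide
  · rw [if_pos ha, if_neg (not_le.mpr hb), dg_of_nonneg a ha i, dg_of_neg b (not_le.mpr hb) i,
      dgNeg, natDigit, Nat.testBit_xor]
    rcases h1 : a.toNat.testBit i <;> rcases h2 : (-b - 1).toNat.testBit i <;>
      simp [h1, h2] <;> decide
  · rw [if_neg (not_le.mpr ha), if_pos hb, dg_of_neg a (not_le.mpr ha) i, dg_of_nonneg b hb i,
      dgNeg, natDigit, Nat.testBit_xor]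
    rcases h1 : (-a - 1).toNat.testBit i <;> rcases h2 : b.toNat.testBit i <;>
      simp [h1, h2] <;> decide
  · rw [if_neg (not_le.mpr ha), if_neg (not_le.mpr hb), dg_of_neg a (not_le.mpr ha) i,
      dg_of_neg b (not_le.mpr hb) i, dgNat, natDigit, Nat.testBit_xor]
    rcases h1 : (-a - 1).toNat.testBit i <;> rcases h2 : (-b - 1).toNat.testBit i <;>
      simp [h1, h2] <;> decide

theorem dg_band (a b : Int) (i : Nat) :
    dg (PySem.Int.band a b) i = dg a i * dg b i := by
  unfold PySem.Int.band
  rcases le_or_gt 0 a with ha | ha <;> rcases le_or_gt 0 b with hb | hb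
  · rw [if_pos ha, if_pos hb, dg_of_nonneg a ha i, dg_of_nonneg b hb i, dgNat, natDigit,
      Nat.testBit_and]
    rcases h1 : a.toNat.testBit i <;> rcases h2 : b.toNat.testBit i <;> simp [h1, h2]
  · rw [if_pos ha, if_neg (not_le.mpr hb), dg_of_nonneg a ha i, dg_of_neg b (not_le.mpr hb) i,
      dgNat, natDigit, sub_and_testBit]
    rcases h1 : a.toNat.testBit i <;> rcases h2 : (-b - 1).toNat.testBit i <;> simp [h1, h2]
  · rw [if_neg (not_le.mpr ha), if_pos hb, dg_of_neg a (not_le.mpr ha) i, dg_of_nonneg b hb i,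
      dgNat, natDigit, sub_and_testBit]
    rcases h1 : (-a - 1).toNat.testBit i <;> rcases h2 : b.toNat.testBit i <;>
      simp [h1, h2] <;> decide
  · rw [if_neg (not_le.mpr ha), if_neg (not_le.mpr hb), dg_of_neg a (not_le.mpr ha) i,
      dg_of_neg b (not_le.mpr hb) i]
    rw [dgNeg, natDigit, Nat.testBit_lor]
    rcases h1 : (-a - 1).toNat.testBit i <;> rcases h2 : (-b - 1).toNat.testBit i <;>
      simp [h1, h2]

theorem dg_bor (a b : Int) (i : Nat) :
    dg (PySem.Int.bor a b) i = max (dg a i) (dg b i) := by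
  unfold PySem.Int.bor
  rcases le_or_gt 0 a with ha | ha <;> rcases le_or_gt 0 b with hb | hb
  · rw [if_pos ha, if_pos hb, dg_of_nonneg a ha i, dg_of_nonneg b hb i, dgNat, natDigit,
      Nat.testBit_or]
    rcases h1 : a.toNat.testBit i <;> rcases h2 : b.toNat.testBit i <;> simp [h1, h2]
  · rw [if_pos ha, if_neg (not_le.mpr hb), dg_of_nonneg a ha i, dg_of_neg b (not_le.mpr hb) i,
      dgNeg, natDigit, sub_and_testBit]
    rcases h1 : (-b - 1).toNat.testBit i <;> rcases h2 : a.toNat.testBit i <;>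
      simp [h1, h2] <;> decide
  · rw [if_neg (not_le.mpr ha), if_pos hb, dg_of_neg a (not_le.mpr ha) i, dg_of_nonneg b hb i,
      dgNeg, natDigit, sub_and_testBit]
    rcases h1 : (-a - 1).toNat.testBit i <;> rcases h2 : b.toNat.testBit i <;>
      simp [h1, h2] <;> decide
  · rw [if_neg (not_le.mpr ha), if_neg (not_le.mpr hb), dg_of_neg a (not_le.mpr ha) i,
      dg_of_neg b (not_le.mpr hb) i, dgNeg, natDigit, Nat.testBit_and]
    rcases h1 : (-a - 1).toNat.testBit i <;> rcases h2 : (-b - 1).toNat.testBit i <;>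
      simp [h1, h2]

-- A's bit extraction is the digit
theorem band_shift_one (a : Int) (i : Nat) : PySem.Int.band (a >>> i) 1 = dg a i := by
  rw [Int.shiftRight_eq_div_pow, PySem.Int.band_one,
    PySem.Int.mod_eq_emod_of_pos (by norm_num)]
  rfl

-- low-bits decomposition of emod
theorem emod_succ (a : Int) (n : Nat) :
    a % 2 ^ (n + 1) = a % 2 ^ n + dg a n * 2 ^ n := by
  have h2 : (0:Int) < 2 ^ n := by positivity
  have hq : 2 ^ n * (a / 2 ^ n) + a % 2 ^ n = a := Int.ediv_add_emod a (2 ^ n)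
  set q := a / 2 ^ n with hqd
  set r := a % 2 ^ n with hrd
  have hr0 : 0 ≤ r := Int.emod_nonneg _ (by omega)
  have hr1 : r < 2 ^ n := Int.emod_lt_of_pos _ h2
  have hq2 : 2 * (q / 2) + q % 2 = q := Int.ediv_add_emod q 2
  have hb0 : 0 ≤ q % 2 := Int.emod_nonneg _ (by norm_num)
  have hb1 : q % 2 < 2 := Int.emod_lt_of_pos _ (by norm_num)
  have key : a = (q % 2 * 2 ^ n + r) + 2 ^ (n + 1) * (q / 2) := by
    rw [pow_succ]
    nlinarith [hq, hq2]
  have hdg : dg a n = q % 2 := rfl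
  rw [hdg]
  calc a % 2 ^ (n + 1) = ((q % 2 * 2 ^ n + r) + 2 ^ (n + 1) * (q / 2)) % 2 ^ (n + 1) := by
        rw [← key]
    _ = (q % 2 * 2 ^ n + r) % 2 ^ (n + 1) := Int.add_mul_emod_self_left _ _ _
    _ = q % 2 * 2 ^ n + r := by
        apply Int.emod_eq_of_lt (by nlinarith) (by rw [pow_succ]; nlinarith)
    _ = r + q % 2 * 2 ^ n := by ring

-- OR-ing a fresh top bit onto a low word is addition
theorem bor_add (m d : Int) (n : Nat) (hm : 0 ≤ m) (hm2 : m < 2 ^ n) (hd : d = 0 ∨ d = 1) :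
    PySem.Int.bor m (d <<< n) = m + d * 2 ^ n := by
  rcases hd with hd | hd <;> subst hd
  · simp [Int.shiftLeft_eq, PySem.Int.bor_zero]
  · rw [Int.shiftLeft_eq, one_mul, PySem.Int.bor_of_nonneg hm (by positivity)]
    have hcast : ((2 ^ n : Nat) : Int) = (2 : Int) ^ n := by push_cast; rfl
    have htn : ((2 : Int) ^ n).toNat = 2 ^ n := by rw [← hcast, Int.toNat_natCast]
    have hlt : m.toNat < 2 ^ n := by omega
    have hdis : m.toNat &&& 2 ^ n = 0 := by
      apply Nat.eq_of_testBit_eq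
      intro j
      simp only [Nat.testBit_land, Nat.zero_testBit]
      rcases eq_or_ne n j with rfl | hne
      · simp [Nat.testBit_lt_two_pow hlt]
      · simp [Nat.testBit_two_pow_of_ne hne]
    rw [htn, dis_or _ _ hdis]
    push_cast
    omega

-- masking with 2^n - 1 is emod
theorem band_mask (a : Int) (n : Nat) :
    PySem.Int.band a ((1 : Int) <<< n - 1) = a % 2 ^ n := by
  rw [Int.shiftLeft_eq, one_mul]
  have h2 : (0:Int) < 2 ^ n := by positivity
  have hcast : ((2 ^ n - 1 : Nat) : Int) = (2 : Int) ^ n - 1 := by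
    push_cast [Nat.one_le_two_pow]
    ring
  have htn : ((2 : Int) ^ n - 1).toNat = 2 ^ n - 1 := by rw [← hcast, Int.toNat_natCast]
  rcases le_or_gt 0 a with ha | ha
  · rw [PySem.Int.band_of_nonneg ha (by omega), htn, Nat.and_two_pow_sub_one_eq_mod]
    have : a = ((a.toNat : Nat) : Int) := by omega
    rw [this]
    push_cast
    rfl
  · simp only [PySem.Int.band, if_neg (not_le.mpr ha), if_pos (by omega : (0:Int) ≤ 2 ^ n - 1)]
    rw [htn, Nat.land_comm, Nat.and_two_pow_sub_one_eq_mod]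
    conv_rhs => rw [int_neg_form a (not_le.mpr ha)]
    rw [(negdiv (-a - 1).toNat (2 ^ n) h2).2]
    have hmlt : (-a - 1).toNat % 2 ^ n < 2 ^ n := Nat.mod_lt _ (by positivity)
    have : (((-a - 1).toNat : Nat) : Int) % 2 ^ n = (((-a - 1).toNat % 2 ^ n : Nat) : Int) := by
      push_cast
      rfl
    rw [this]
    push_cast
    omega

-- the per-bit loop computes the low n bits of the whole-word sum and carry words
theorem loop_main (x y z : Int) (n : Nat) :
    (List.range n).foldl
      (fun (SC : Int × Int) (i : Nat) =>
        (PySem.Int.bor SC.1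
          ((PySem.Int.bxor (PySem.Int.bxor (PySem.Int.band (x >>> i) 1) (PySem.Int.band (y >>> i) 1)) (PySem.Int.band (z >>> i) 1)) <<< i),
         PySem.Int.bor SC.2
          ((PySem.Int.bor (PySem.Int.bor (PySem.Int.band (PySem.Int.band (x >>> i) 1) (PySem.Int.band (y >>> i) 1)) (PySem.Int.band (PySem.Int.band (y >>> i) 1) (PySem.Int.band (z >>> i) 1))) (PySem.Int.band (PySem.Int.band (z >>> i) 1) (PySem.Int.band (x >>> i) 1))) <<< i)))
      (0, 0)
    = (PySem.Int.bxor (PySem.Int.bxor x y) z % 2 ^ n,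
       PySem.Int.bor (PySem.Int.bor (PySem.Int.band x y) (PySem.Int.band y z)) (PySem.Int.band z x) % 2 ^ n) := by
  induction n with
  | zero => simp
  | succ n ih =>
    rw [List.range_succ]
    simp only [List.foldl_append]
    rw [ih]
    simp only [List.foldl_cons, List.foldl_nil, band_shift_one]
    have hx := dg_nonneg x n
    have hy := dg_nonneg y n
    have hz := dg_nonneg z n
    have hS : PySem.Int.bxor (PySem.Int.bxor (dg x n) (dg y n)) (dg z n)
        = dg (PySem.Int.bxor (PySem.Int.bxor x y) z) n := by
      rw [dg_bxor, dg_bxor]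
      have hx' : dg x n = 0 ∨ dg x n = 1 := by omega
      have hy' : dg y n = 0 ∨ dg y n = 1 := by omega
      have hz' : dg z n = 0 ∨ dg z n = 1 := by omega
      rcases hx' with h1 | h1 <;> rcases hy' with h2 | h2 <;> rcases hz' with h3 | h3 <;>
        rw [h1, h2, h3] <;> decide
    have hC : PySem.Int.bor (PySem.Int.bor (PySem.Int.band (dg x n) (dg y n)) (PySem.Int.band (dg y n) (dg z n))) (PySem.Int.band (dg z n) (dg x n))
        = dg (PySem.Int.bor (PySem.Int.bor (PySem.Int.band x y) (PySem.Int.band y z)) (PySem.Int.band z x)) n := by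
      rw [dg_bor, dg_bor, dg_band, dg_band, dg_band]
      have hx' : dg x n = 0 ∨ dg x n = 1 := by omega
      have hy' : dg y n = 0 ∨ dg y n = 1 := by omega
      have hz' : dg z n = 0 ∨ dg z n = 1 := by omega
      rcases hx' with h1 | h1 <;> rcases hy' with h2 | h2 <;> rcases hz' with h3 | h3 <;>
        rw [h1, h2, h3] <;> decide
    set wS := PySem.Int.bxor (PySem.Int.bxor x y) z with hwS
    set wC := PySem.Int.bor (PySem.Int.bor (PySem.Int.band x y) (PySem.Int.band y z)) (PySem.Int.band z x) with hwC
    have h2 : (0:Int) < 2 ^ n := by positivity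
    have hSd := dg_nonneg wS n
    have hCd := dg_nonneg wC n
    rw [hS, hC,
      bor_add _ _ n (Int.emod_nonneg _ (by omega)) (Int.emod_lt_of_pos _ h2) (by omega),
      bor_add _ _ n (Int.emod_nonneg _ (by omega)) (Int.emod_lt_of_pos _ h2) (by omega),
      ← emod_succ, ← emod_succ]

-- the two csa implementations agree
theorem csa_eq (x y z : Int) (ob : Option Int) : csa x y z ob = csa_alt x y z ob := by
  simp only [csa, csa_alt, csaT]
  generalize (match ob with
    | none => ((max (max (PySem.Int.bitLength x) (PySem.Int.bitLength y)) (PySem.Int.bitLength z) : Nat) : Int)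
    | some t => if t = 0 then ((max (max (PySem.Int.bitLength x) (PySem.Int.bitLength y)) (PySem.Int.bitLength z) : Nat) : Int) else t) = T
  have hmax : (max T 0).toNat = T.toNat := by omega
  rw [hmax, PySem.List.pyRange_one, List.foldl_map]
  have hT0 : (T - 0).toNat = T.toNat := by omega
  rw [hT0]
  simp only [zero_add, Int.toNat_natCast, Int.shiftRight_natCast_right,
    Int.shiftLeft_natCast_right]
  rw [loop_main x y z T.toNat, band_mask, band_mask]

theorem fold_eq (rest : List Int) (ob : Option Int) (sc : Int × Int) :
    rest.foldl (fun (sc : Int × Int) e => csa sc.1 sc.2 e ob) sc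
      = rest.foldl (fun (sc : Int × Int) e => csa_alt sc.1 sc.2 e ob) sc := by
  have : (fun (sc : Int × Int) e => csa sc.1 sc.2 e ob)
      = fun (sc : Int × Int) e => csa_alt sc.1 sc.2 e ob := by
    funext sc e
    exact csa_eq sc.1 sc.2 e ob
  rw [this]

-- ===== VERDICT (by name: the statement is the Claim_ definition above) =====
theorem compress_sequential_spec : Claim_equal_compress_sequential := by
  intro numbers _bits _hdom hpre
  unfold Spec_compress_sequential
  rcases numbers with _ | ⟨s, _ | ⟨c, rest⟩⟩
  · simp [Pre_compress_sequential] at hpre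
  · simp [Pre_compress_sequential] at hpre
  · unfold compress_sequential compress_sequential_alt
    have hg0 : PySem.List.pyGetD (s :: c :: rest) 0 0 = s := by simp [pysem]
    have hg1 : PySem.List.pyGetD (s :: c :: rest) 1 0 = c := by simp [pysem]
    have hsl : PySem.List.slice (s :: c :: rest) (some 2) none = rest := by
      rw [PySem.List.slice_from _ (by omega : (0:Int) ≤ 2)]
      simp
    rcases rest with _ | ⟨e, rest'⟩
    · simp [hg0, hg1]
    · have hlen : ¬ (s :: c :: e :: rest').length < 2 := by simp
      have hlen2 : ¬ (s :: c :: e :: rest').length = 2 := by simp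
      rw [if_neg hlen, if_neg hlen2]
      simp only [hg0, hg1, hsl, fold_eq]
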